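-- pv_equiv track=rewrite | github.com/joe-rac/shopify | neaf_vendor_utils.py | buildLastOrderDateVendorsMap
-- ===== SOURCE A (Python) =====
-- def buildLastOrderDateVendorsMap(vendor_last_order_date_map):
--     lo_map = {}
--     for company,lod in vendor_last_order_date_map.items():
--         companies = lo_map.get(lod,[])
--         if not companies:
--             lo_map[lod] = companies
--         companies.append(company)
--
--     last_order_date_vendors_map = {}
--     keys = sorted(lo_map.keys())
--     for key in keys:
--         last_order_date_vendors_map[key] = lo_map[key]
--     return last_order_date_vendors_map
-- ===== SOURCE B (Python) =====
-- def buildLastOrderDateVendorsMap(vendor_last_order_date_map):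
--     items = vendor_last_order_date_map.items()
--     dates = sorted({lod for _, lod in items})
--     return {d: [c for c, lod in items if lod == d] for d in dates}
-- ===== Notes on version B (the rewrite author's own statement) =====
-- stated objective: simpler
-- what changed: Instead of bucketing companies into a dict in one pass and then copying buckets out in sorted-key order, B collects the distinct dates as a set, sorts them, and builds the result with one dict comprehension that filters the items per date.
import Mathlib
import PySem

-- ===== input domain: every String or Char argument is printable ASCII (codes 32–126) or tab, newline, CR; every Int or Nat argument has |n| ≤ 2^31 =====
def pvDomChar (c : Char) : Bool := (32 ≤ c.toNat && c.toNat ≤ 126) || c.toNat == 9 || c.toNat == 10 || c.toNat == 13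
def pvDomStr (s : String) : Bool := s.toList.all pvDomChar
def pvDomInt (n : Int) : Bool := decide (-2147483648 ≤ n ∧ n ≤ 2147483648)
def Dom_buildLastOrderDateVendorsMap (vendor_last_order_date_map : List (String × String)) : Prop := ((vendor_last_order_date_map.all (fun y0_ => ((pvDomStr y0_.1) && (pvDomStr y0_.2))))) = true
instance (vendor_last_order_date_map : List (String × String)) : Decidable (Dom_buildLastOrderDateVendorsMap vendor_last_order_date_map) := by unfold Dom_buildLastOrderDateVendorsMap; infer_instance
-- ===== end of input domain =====

-- B replaces A's bucket-into-dict-then-copy-in-sorted-key-order with sorting the set of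
-- distinct dates and building the result by filtering the items per date (simpler
-- decomposition; not claimed faster).


-- ===== PORT A =====
-- A's first loop. The aliasing in `companies = lo_map.get(lod, []); if not companies:
-- lo_map[lod] = companies; companies.append(company)` nets out to storing, under `lod`,
-- the fetched list extended by `company` — which is what this functional step does.
def pvLoMap (vendor_last_order_date_map : List (String × String)) :
    PySem.Dict String (List String) :=
  vendor_last_order_date_map.foldl
    (fun lo_map p => lo_map.insert p.2 (lo_map.getD p.2 [] ++ [p.1])) PySem.Dict.empty

def buildLastOrderDateVendorsMap (vendor_last_order_date_map : List (String × String)) :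
    List (String × List String) :=
  let lo_map := pvLoMap vendor_last_order_date_map
  let keys := PySem.List.sorted lo_map.keys id
  (keys.foldl (fun d key => d.insert key (lo_map.getD key [])) PySem.Dict.empty).items

-- ===== PORT B =====
def buildLastOrderDateVendorsMap_alt (vendor_last_order_date_map : List (String × String)) :
    List (String × List String) :=
  let dates := PySem.List.sorted
    (PySem.Set.ofList (vendor_last_order_date_map.map Prod.snd)) id
  dates.map (fun d =>
    (d, (vendor_last_order_date_map.filter (fun p => p.2 == d)).map Prod.fst))

-- ===== PRECONDITION & SPEC =====
def Spec_buildLastOrderDateVendorsMap (vendor_last_order_date_map : List (String × String)) (out : List (String × List String)) : Prop := out = buildLastOrderDateVendorsMap_alt vendor_last_order_date_map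
instance (vendor_last_order_date_map : List (String × String)) (out : List (String × List String)) : Decidable (Spec_buildLastOrderDateVendorsMap vendor_last_order_date_map out) := by unfold Spec_buildLastOrderDateVendorsMap; infer_instance

-- ===== CLAIM (what is proved, stated in full; the proofs are below) =====
def Claim_equal_buildLastOrderDateVendorsMap : Prop := ∀ (vendor_last_order_date_map : List (String × String)), Dom_buildLastOrderDateVendorsMap vendor_last_order_date_map → Spec_buildLastOrderDateVendorsMap vendor_last_order_date_map (buildLastOrderDateVendorsMap vendor_last_order_date_map)

-- ===== LEMMAS AND PROOFS =====

-- first-match lookup in an association list keyed by its own first components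
theorem pv_find_map_keyed (K : List String) (val : String → List String) (k : String) :
    List.find? (fun p => p.1 == k) (K.map (fun d => (d, val d)))
      = if k ∈ K then some (k, val k) else none := by
  induction K with
  | nil => simp
  | cons d K ih =>
    by_cases h : d = k
    · subst h; simp
    · simp [ih, h, Ne.symm h]

-- the dict built by A's first loop, characterised: its keys are the distinct dates in
-- first-occurrence order, each value the companies with that date in input order
theorem pv_loMap_items (m : List (String × String)) :
    (pvLoMap m).items
      = (PySem.Set.ofList (m.map Prod.snd)).map
          (fun d => (d, (m.filter (fun p => p.2 == d)).map Prod.fst)) := by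
  induction m using List.reverseRecOn with
  | nil => rfl
  | append_singleton xs p ih =>
    have hget : ∀ k, (pvLoMap xs).getD k []
        = (xs.filter (fun q => q.2 == k)).map Prod.fst := by
      intro k
      simp only [PySem.Dict.getD, PySem.Dict.get?, ih, pv_find_map_keyed]
      by_cases hk : k ∈ PySem.Set.ofList (xs.map Prod.snd)
      · simp [hk]
      · have hf : ∀ q ∈ xs, ¬ ((q.2 == k) = true) := by
          intro q hq hqk
          exact hk ((PySem.Set.mem_ofList _ _).2
            (List.mem_map.2 ⟨q, hq, by simpa using hqk⟩))
        simp [hk, List.filter_eq_nil_iff.2 hf]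
    have hcont : (pvLoMap xs).contains p.2
        = decide (p.2 ∈ PySem.Set.ofList (xs.map Prod.snd)) := by
      simp [PySem.Dict.contains, ih, List.any_eq, decide_eq_decide]
    have hstep : pvLoMap (xs ++ [p])
        = (pvLoMap xs).insert p.2 ((pvLoMap xs).getD p.2 [] ++ [p.1]) := by
      simp [pvLoMap, List.foldl_append]
    have hsets : PySem.Set.ofList ((xs ++ [p]).map Prod.snd)
        = PySem.Set.add (PySem.Set.ofList (xs.map Prod.snd)) p.2 := by
      simp [PySem.Set.ofList, List.foldl_append]
    by_cases hp : p.2 ∈ PySem.Set.ofList (xs.map Prod.snd)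
    · have hadd : PySem.Set.add (PySem.Set.ofList (xs.map Prod.snd)) p.2
          = PySem.Set.ofList (xs.map Prod.snd) := by
        simp [PySem.Set.add, hp]
      rw [hstep, hsets, hadd]
      simp only [PySem.Dict.insert, hcont, hp, decide_true, ih, hget, List.map_map]
      refine List.map_congr_left (fun d hd => ?_)
      by_cases hdp : d = p.2
      · subst hdp; simp [List.filter_append]
      · have h2 : (p.2 == d) = false := by
          simp only [beq_eq_false_iff_ne, ne_eq]
          exact fun h => hdp h.symm
        simp [Function.comp, hdp, List.filter_append, h2]
    · have hfilt : xs.filter (fun q => q.2 == p.2) = [] :=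
        List.filter_eq_nil_iff.2 (fun q hq hqk =>
          hp ((PySem.Set.mem_ofList _ _).2
            (List.mem_map.2 ⟨q, hq, by simpa using hqk⟩)))
      have hadd : PySem.Set.add (PySem.Set.ofList (xs.map Prod.snd)) p.2
          = PySem.Set.ofList (xs.map Prod.snd) ++ [p.2] := by
        simp only [PySem.Set.add]
        rw [if_neg (by simpa using hp)]
      have hc : (pvLoMap xs).contains p.2 = false := by
        rw [hcont]; simpa using hp
      rw [hstep, hsets, hadd]
      simp only [PySem.Dict.insert, hc, Bool.false_eq_true, if_false, hget, hfilt, ih,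
        List.map_append, List.map_nil, List.nil_append]
      congr 1
      · refine List.map_congr_left (fun d hd => ?_)
        have hdp : p.2 ≠ d := fun h => hp (h ▸ hd)
        have h2 : (p.2 == d) = false := by
          simp only [beq_eq_false_iff_ne, ne_eq]; exact hdp
        simp [List.filter_append, h2]
      · simp [List.filter_append, hfilt]

theorem pv_loMap_getD (m : List (String × String)) (k : String) :
    (pvLoMap m).getD k [] = (m.filter (fun q => q.2 == k)).map Prod.fst := by
  simp only [PySem.Dict.getD, PySem.Dict.get?, pv_loMap_items, pv_find_map_keyed]
  by_cases hk : k ∈ PySem.Set.ofList (m.map Prod.snd)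
  · simp [hk]
  · have hf : ∀ q ∈ m, ¬ ((q.2 == k) = true) := fun q hq hqk =>
      hk ((PySem.Set.mem_ofList _ _).2
        (List.mem_map.2 ⟨q, hq, by simpa using hqk⟩))
    simp [hk, List.filter_eq_nil_iff.2 hf]

-- A's second loop: inserting pairwise-distinct fresh keys into a dict just appends them
theorem pv_foldl_insert_fresh (ks : List String) (f : String → List String)
    (d : PySem.Dict String (List String)) (hnd : ks.Nodup)
    (h : ∀ k ∈ ks, d.contains k = false) :
    (ks.foldl (fun d k => d.insert k (f k)) d).items
      = d.items ++ ks.map (fun k => (k, f k)) := by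
  induction ks generalizing d with
  | nil => simp
  | cons k ks ih =>
    have hk : d.contains k = false := h k (by simp)
    have hins : (d.insert k (f k)).items = d.items ++ [(k, f k)] := by
      simp [PySem.Dict.insert, hk]
    have hcont : ∀ k' ∈ ks, (d.insert k (f k)).contains k' = false := by
      intro k' hk'
      have hne : (k == k') = false := by
        simp only [beq_eq_false_iff_ne, ne_eq]
        rintro rfl; exact (List.nodup_cons.1 hnd).1 hk'
      have := h k' (List.mem_cons_of_mem _ hk')
      simp only [PySem.Dict.contains, hins, List.any_append, List.any_cons,
        List.any_nil, Bool.or_false] at *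
      simp [this, hne]
    simpa [hins] using ih (List.nodup_cons.1 hnd).2 (d := d.insert k (f k)) hcont

theorem buildLastOrderDateVendorsMap_eq (m : List (String × String)) :
    buildLastOrderDateVendorsMap m = buildLastOrderDateVendorsMap_alt m := by
  have hkeys : (pvLoMap m).keys = PySem.Set.ofList (m.map Prod.snd) := by
    simp [PySem.Dict.keys, pv_loMap_items, List.map_map, Function.comp_def]
  have hnd : (PySem.List.sorted (PySem.Set.ofList (m.map Prod.snd)) id).Nodup :=
    (PySem.List.sorted_perm _ id false).nodup_iff.2 (PySem.Set.nodup_ofList _)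
  have hfresh := pv_foldl_insert_fresh
      (PySem.List.sorted (PySem.Set.ofList (m.map Prod.snd)) id)
      (fun k => (pvLoMap m).getD k []) PySem.Dict.empty hnd
      (fun k _ => by simp [PySem.Dict.contains, PySem.Dict.empty])
  simp only [buildLastOrderDateVendorsMap, buildLastOrderDateVendorsMap_alt, hkeys]
  rw [hfresh]
  simp only [PySem.Dict.empty, List.nil_append]
  exact List.map_congr_left fun k hk => by rw [pv_loMap_getD]

-- ===== VERDICT (by name: the statement is the Claim_ definition above) =====
theorem buildLastOrderDateVendorsMap_spec : Claim_equal_buildLastOrderDateVendorsMap := by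
  intro m _
  exact buildLastOrderDateVendorsMap_eq m
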